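-- pv_equiv track=rewrite | github.com/FriedrichtenHagen/advent_of_code_2023 | day7/day7part1.py | x_of_a_kind
-- ===== SOURCE A (Python) =====
-- def x_of_a_kind(hand, x):
--     char_count = {}
--     for character in hand:
--         if character in char_count:
--             char_count[character] += 1
--         else:
--             char_count[character] = 1
--
--     for count in char_count.values():
--         if(count == x):
--             return f'{x} of a kind'
--
--     return None
-- ===== SOURCE B (Python) =====
-- def x_of_a_kind(hand, x):
--     # Sort the hand so equal cards are contiguous, then scan runs.
--     s = sorted(hand)
--     while s:
--         c = s[0]
--         n = 1
--         while n < len(s) and s[n] == c: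
--             n += 1
--         if n == x:
--             return f'{x} of a kind'
--         s = s[n:]
--     return None
-- ===== Notes on version B (the rewrite author's own statement) =====
-- stated objective: alternative
-- what changed: Replaces the frequency dictionary and the pass over its values by sort-then-scan: sort the hand so equal cards are contiguous, then walk the runs and test each run length against x.
import Mathlib
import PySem

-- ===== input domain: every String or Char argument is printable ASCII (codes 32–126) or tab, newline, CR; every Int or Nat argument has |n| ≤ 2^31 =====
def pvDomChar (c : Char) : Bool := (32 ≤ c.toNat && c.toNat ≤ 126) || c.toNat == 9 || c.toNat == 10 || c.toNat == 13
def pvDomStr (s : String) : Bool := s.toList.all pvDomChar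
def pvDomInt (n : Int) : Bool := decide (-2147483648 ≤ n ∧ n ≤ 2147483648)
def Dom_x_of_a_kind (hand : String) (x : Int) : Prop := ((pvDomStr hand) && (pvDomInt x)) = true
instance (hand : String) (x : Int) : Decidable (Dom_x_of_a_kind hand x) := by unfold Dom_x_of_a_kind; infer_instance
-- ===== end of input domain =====

-- B replaces A's frequency dictionary + value scan by sort-then-scan over runs of equal
-- cards (alternative decomposition, not claimed faster).

-- ===== PORT A =====
-- 'for count in char_count.values(): if count == x: return f'{x} of a kind'; return None'
def xLoopA (x : Int) : List Int → Option String
  | [] => none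
  | c :: rest =>
    if c == x then some (PySem.Int.toStr x ++ " of a kind") else xLoopA x rest

def x_of_a_kind (hand : String) (x : Int) : Option String :=
  let char_count := hand.toList.foldl
    (fun d character =>
      if d.contains character then d.insert character (d.getD character 0 + 1)
      else d.insert character 1)
    (PySem.Dict.empty : PySem.Dict Char Int)
  xLoopA x char_count.values

-- ===== PORT B =====
-- the outer while loop: count the leading run (inner while = takeWhile), test it,
-- then continue on s[n:] (= dropWhile)
def runScanB (x : Int) : List Char → Option String
  | [] => none
  | c :: rest =>
    if ((1 + (rest.takeWhile (fun d => d == c)).length : Int) == x) then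
      some (PySem.Int.toStr x ++ " of a kind")
    else runScanB x (rest.dropWhile (fun d => d == c))
termination_by l => l.length
decreasing_by
  simp only [List.length_cons]
  exact Nat.lt_succ_of_le (List.length_dropWhile_le _ _)

def x_of_a_kind_alt (hand : String) (x : Int) : Option String :=
  runScanB x (PySem.List.sorted hand.toList (fun c => c) false)

-- ===== PRECONDITION & SPEC =====
def Spec_x_of_a_kind (hand : String) (x : Int) (out : Option String) : Prop := out = x_of_a_kind_alt hand x
instance (hand : String) (x : Int) (out : Option String) : Decidable (Spec_x_of_a_kind hand x out) := by unfold Spec_x_of_a_kind; infer_instance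

-- ===== CLAIM =====
def Claim_equal_x_of_a_kind : Prop := ∀ (hand : String) (x : Int), Dom_x_of_a_kind hand x → Spec_x_of_a_kind hand x (x_of_a_kind hand x)

-- ===== LEMMAS AND PROOFS =====

-- A's counting loop builds exactly collections.Counter(chars)
theorem foldA_eq_counter (chars : List Char) :
    chars.foldl
      (fun d character =>
        if d.contains character then d.insert character (d.getD character 0 + 1)
        else d.insert character 1)
      (PySem.Dict.empty : PySem.Dict Char Int)
    = PySem.Dict.counter chars := by
  have hstep :
      (fun (d : PySem.Dict Char Int) character =>
        if d.contains character then d.insert character (d.getD character 0 + 1)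
        else d.insert character 1)
      = fun d character => d.insert character (d.getD character 0 + 1) := by
    funext d c
    by_cases h : d.contains c = true
    · simp [h]
    · have hget : d.get? c = none := by
        have := PySem.Dict.contains_eq_isSome_get? d c
        cases hg : d.get? c with
        | none => rfl
        | some v => rw [hg] at this; simp [this] at h
      simp [h, PySem.Dict.getD, hget]
  rw [hstep, PySem.Dict.foldl_insert_getD_add_one_eq_counter]

-- A's value-scanning loop returns the string iff some value equals x
theorem xLoopA_eq_any (x : Int) (l : List Int) :
    xLoopA x l = (if l.any (· == x) then some (PySem.Int.toStr x ++ " of a kind") else none) := by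
  induction l with
  | nil => rfl
  | cons c rest ih =>
    by_cases h : c = x
    · simp [xLoopA, h]
    · simp [xLoopA, h, ih]

-- on a nondecreasing c :: rest, everything past the leading run of c differs from c
theorem dropWhile_ne_head {c : Char} {rest : List Char}
    (hs : (c :: rest).Pairwise (· ≤ ·)) :
    ∀ d ∈ rest.dropWhile (fun d => d == c), d ≠ c := by
  intro d hd
  cases hD : rest.dropWhile (fun d => d == c) with
  | nil => simp [hD] at hd
  | cons e t =>
    have hehd : ¬ (e == c) = true := by
      have := List.head?_dropWhile_not (fun d => d == c) rest
      simp [hD] at this; simpa using this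
    have hec : e ≠ c := by simpa using hehd
    have hce : c ≤ e := by
      have hmem : e ∈ rest := by
        have : e ∈ rest.dropWhile (fun d => d == c) := by simp [hD]
        exact (List.dropWhile_sublist _).subset this
      exact (List.pairwise_cons.mp hs).1 e hmem
    have hlt : c < e := lt_of_le_of_ne hce (fun h => hec h.symm)
    rw [hD] at hd
    rcases List.mem_cons.mp hd with h | h
    · exact h ▸ hec
    · have hsuffix : (e :: t).Pairwise (· ≤ ·) := by
        have : (rest.dropWhile (fun d => d == c)).Pairwise (· ≤ ·) :=
          ((List.pairwise_cons.mp hs).2).sublist (List.dropWhile_sublist _)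
        rwa [hD] at this
      have hed : e ≤ d := (List.pairwise_cons.mp hsuffix).1 d h
      exact fun hdc => absurd (hdc ▸ hed) (not_le_of_gt hlt)

-- the head's total count is 1 + the length of its leading run
theorem count_head_eq_run {c : Char} {rest : List Char}
    (hrw : rest = rest.takeWhile (fun d => d == c) ++ rest.dropWhile (fun d => d == c))
    (htake : ∀ d ∈ rest.takeWhile (fun d => d == c), d = c)
    (hdropne : ∀ d ∈ rest.dropWhile (fun d => d == c), d ≠ c) :
    ((c :: rest).count c : Int) = 1 + (rest.takeWhile (fun d => d == c)).length := by
  rw [List.count_cons_self]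
  conv_lhs => rw [hrw]
  rw [List.count_append]
  have h1 : (rest.takeWhile (fun d => d == c)).count c = (rest.takeWhile (fun d => d == c)).length :=
    List.count_eq_length.mpr (fun d hd => by simp [htake d hd])
  have h2 : (rest.dropWhile (fun d => d == c)).count c = 0 :=
    List.count_eq_zero.mpr (fun h => (hdropne c h) rfl)
  rw [h1, h2]; push_cast; ring

-- on a nondecreasing list, the run scan succeeds iff some element's count equals x
theorem runScanB_eq_any (x : Int) (l : List Char) :
    l.Pairwise (· ≤ ·) →
    runScanB x l =
      (if l.any (fun c => (l.count c : Int) == x) then some (PySem.Int.toStr x ++ " of a kind") else none) := by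
  induction l using runScanB.induct x with
  | case1 => intro _; rw [runScanB]; simp
  | case2 c rest htrue =>
    intro hs
    have hrw : rest = rest.takeWhile (fun d => d == c) ++ rest.dropWhile (fun d => d == c) :=
      (List.takeWhile_append_dropWhile).symm
    have htake : ∀ d ∈ rest.takeWhile (fun d => d == c), d = c := by
      intro d hd
      have := List.mem_takeWhile_imp hd
      simpa using this
    have hdropne : ∀ d ∈ rest.dropWhile (fun d => d == c), d ≠ c :=
      dropWhile_ne_head hs
    have hcount : ((c :: rest).count c : Int) = 1 + (rest.takeWhile (fun d => d == c)).length :=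
      count_head_eq_run hrw htake hdropne
    rw [runScanB]
    simp only [htrue, if_true]
    have hx : (1 + ((rest.takeWhile (fun d => d == c)).length : Int)) = x := by
      simpa using htrue
    have hcx : ((c :: rest).count c : Int) = x := by rw [hcount]; exact_mod_cast hx
    have hany : (c :: rest).any (fun d => ((c :: rest).count d : Int) == x) = true := by
      refine List.any_eq_true.mpr ⟨c, List.mem_cons_self, ?_⟩
      simpa using hcx
    rw [hany]; simp
  | case3 c rest hfalse ih =>
    intro hs
    have hrw : rest = rest.takeWhile (fun d => d == c) ++ rest.dropWhile (fun d => d == c) :=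
      (List.takeWhile_append_dropWhile).symm
    have htake : ∀ d ∈ rest.takeWhile (fun d => d == c), d = c := by
      intro d hd
      have := List.mem_takeWhile_imp hd
      simpa using this
    have hdropne : ∀ d ∈ rest.dropWhile (fun d => d == c), d ≠ c :=
      dropWhile_ne_head hs
    have hcount : ((c :: rest).count c : Int) = 1 + (rest.takeWhile (fun d => d == c)).length :=
      count_head_eq_run hrw htake hdropne
    have hx : (1 + ((rest.takeWhile (fun d => d == c)).length : Int)) ≠ x := by
      intro h; exact hfalse (beq_iff_eq.mpr h)
    rw [runScanB]
    have hxb : ((1 + ((rest.takeWhile (fun d => d == c)).length : Int)) == x) = false := by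
      simpa using hx
    rw [hxb]; simp only [Bool.false_eq_true, if_false]
    have hdsorted : (rest.dropWhile (fun d => d == c)).Pairwise (· ≤ ·) :=
      ((List.pairwise_cons.mp hs).2).sublist (List.dropWhile_sublist _)
    rw [ih hdsorted]
    -- counts in the drop part equal counts in the whole list for its members
    have hcnt_eq : ∀ d ∈ rest.dropWhile (fun d => d == c),
        (rest.dropWhile (fun d => d == c)).count d = (c :: rest).count d := by
      intro d hd
      have hdc := hdropne d hd
      rw [List.count_cons]
      conv_rhs => rw [hrw]
      rw [List.count_append]
      have h1 : (rest.takeWhile (fun d => d == c)).count d = 0 :=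
        List.count_eq_zero.mpr (fun h => hdc (htake d h))
      simp [h1]
      exact fun h => hdc h.symm
    have hany_eq : ((rest.dropWhile (fun d => d == c)).any
          (fun d => ((rest.dropWhile (fun d => d == c)).count d : Int) == x))
        = ((c :: rest).any (fun d => ((c :: rest).count d : Int) == x)) := by
      apply Bool.eq_iff_iff.mpr
      constructor
      · intro h
        obtain ⟨d, hd, hdx⟩ := List.any_eq_true.mp h
        refine List.any_eq_true.mpr ⟨d, ?_, ?_⟩
        · exact List.mem_cons_of_mem _ ((List.dropWhile_sublist _).subset hd)
        · rw [← hcnt_eq d hd]; exact hdx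
      · intro h
        obtain ⟨d, hd, hdx⟩ := List.any_eq_true.mp h
        by_cases hdc : d = c
        · exfalso
          subst hdc
          have : ((d :: rest).count d : Int) = x := by simpa using hdx
          rw [hcount] at this
          exact hx this
        · have hdrest : d ∈ rest := by
            rcases List.mem_cons.mp hd with h' | h'
            · exact absurd h' hdc
            · exact h'
          have hddrop : d ∈ rest.dropWhile (fun e => e == c) := by
            conv at hdrest => rw [hrw]
            rcases List.mem_append.mp hdrest with h' | h'
            · exact absurd (htake d h') hdc
            · exact h'
          refine List.any_eq_true.mpr ⟨d, hddrop, ?_⟩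
          rw [hcnt_eq d hddrop]; exact hdx
    rw [hany_eq]

-- ===== VERDICT =====
theorem x_of_a_kind_spec : Claim_equal_x_of_a_kind := by
  intro hand x _
  unfold Spec_x_of_a_kind x_of_a_kind x_of_a_kind_alt
  rw [foldA_eq_counter]
  show xLoopA x (PySem.Dict.counter hand.toList).values = _
  rw [PySem.Dict.values_eq_map_keys _ (PySem.Dict.nodup_keys_counter hand.toList) 0]
  rw [xLoopA_eq_any]
  set s := PySem.List.sorted hand.toList (fun c => c) false with hsdef
  have hperm : s.Perm hand.toList := PySem.List.sorted_perm _ _ _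
  have hsorted : s.Pairwise (· ≤ ·) := by
    have := PySem.List.sorted_pairwise hand.toList (fun c : Char => c)
    simpa [hsdef] using this
  rw [runScanB_eq_any x s hsorted]
  have hAB : (((PySem.Dict.counter hand.toList).keys.map
        (fun k => (PySem.Dict.counter hand.toList).getD k 0)).any (· == x))
      = (s.any fun c => ((s.count c : Int) == x)) := by
    rw [List.any_map]
    apply Bool.eq_iff_iff.mpr
    simp only [List.any_eq_true, Function.comp_apply]
    constructor
    · rintro ⟨d, hd, hdx⟩
      have hdmem : d ∈ hand.toList := by
        rw [PySem.Dict.keys_counter] at hd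
        simpa using (PySem.Set.mem_ofList (xs := hand.toList) (y := d)).mp hd
      refine ⟨d, hperm.mem_iff.mpr hdmem, ?_⟩
      rw [hperm.count_eq]
      rw [PySem.Dict.getD_counter] at hdx
      exact hdx
    · rintro ⟨d, hd, hdx⟩
      have hdmem : d ∈ hand.toList := hperm.mem_iff.mp hd
      refine ⟨d, ?_, ?_⟩
      · rw [PySem.Dict.keys_counter]
        exact (PySem.Set.mem_ofList (xs := hand.toList) (y := d)).mpr hdmem
      rw [PySem.Dict.getD_counter]
      rw [hperm.count_eq] at hdx
      exact hdx
  rw [hAB]
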